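-- pv_equiv track=rewrite | github.com/agent-fox-dev/agent-fox-v3 | agent_fox/engine/engine.py | _build_edges_dict
-- ===== SOURCE A (Python) =====
-- def _build_edges_dict(
--     nodes: dict,
--     edges_list: list[dict],
-- ) -> dict[str, list[str]]:
--     """Build adjacency list from plan edges.
--
--     Returns dict mapping each node to its dependencies (predecessors).
--     """
--     edges_dict: dict[str, list[str]] = {nid: [] for nid in nodes}
--     for edge in edges_list:
--         source = edge["source"]
--         target = edge["target"]
--         if target in edges_dict:
--             edges_dict[target].append(source)
--     return edges_dict
-- ===== SOURCE B (Python) =====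
-- def _build_edges_dict(nodes, edges_list):
--     """Build adjacency list from plan edges: for each node, scan the edge list
--     and collect the sources of the edges targeting it (stateless nested scan,
--     no dict mutation)."""
--     return {nid: [e["source"] for e in edges_list if e["target"] == nid]
--             for nid in nodes}
-- ===== Notes on version B (the rewrite author's own statement) =====
-- stated objective: alternative
-- what changed: A pre-seeds a mutable dict with node keys and fills it with a guarded in-place append per edge; B is a stateless nested comprehension that, for each node key, rescans the edge list and collects the sources of edges targeting it, trading one indexed pass for n independent scans.
import Mathlib
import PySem

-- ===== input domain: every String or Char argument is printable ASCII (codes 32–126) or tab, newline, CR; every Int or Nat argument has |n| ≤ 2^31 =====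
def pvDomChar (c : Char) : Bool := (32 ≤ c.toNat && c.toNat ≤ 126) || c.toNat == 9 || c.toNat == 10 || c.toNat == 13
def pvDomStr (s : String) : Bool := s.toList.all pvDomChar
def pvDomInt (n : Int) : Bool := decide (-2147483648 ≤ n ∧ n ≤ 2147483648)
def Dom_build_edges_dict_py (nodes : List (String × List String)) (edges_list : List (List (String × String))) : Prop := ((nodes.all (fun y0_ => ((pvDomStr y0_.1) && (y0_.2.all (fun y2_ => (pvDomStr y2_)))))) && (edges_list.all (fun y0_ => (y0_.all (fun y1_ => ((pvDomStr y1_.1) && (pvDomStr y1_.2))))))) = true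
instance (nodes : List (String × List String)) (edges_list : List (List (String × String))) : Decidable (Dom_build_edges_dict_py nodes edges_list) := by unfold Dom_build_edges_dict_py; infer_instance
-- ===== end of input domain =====

-- B replaces A's pre-seeded mutable dict with a guarded per-edge append by a stateless
-- nested comprehension: for each node key it rescans the edge list and collects the
-- sources of the edges targeting it (alternative decomposition; B is O(n*m), not faster).

-- ===== PORT A =====
def build_edges_dict_py (nodes : List (String × List String)) (edges_list : List (List (String × String))) : List (String × List String) :=
  -- edges_dict = {nid: [] for nid in nodes}
  let d0 : PySem.Dict String (List String) :=
    nodes.foldl (fun d p => d.insert p.1 []) PySem.Dict.empty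
  -- for edge in edges_list: …  (edge["source"]/edge["target"]: a missing key is a KeyError, excluded by Pre_)
  let d := edges_list.foldl (fun d edge =>
    match edge.lookup "source", edge.lookup "target" with
    | some s, some t =>
        if d.contains t then d.modify t [] (fun l => l ++ [s]) else d
    | _, _ => d) d0
  d.items

-- ===== PORT B =====
def build_edges_dict_py_alt (nodes : List (String × List String)) (edges_list : List (List (String × String))) : List (String × List String) :=
  -- {nid: [e["source"] for e in edges_list if e["target"] == nid] for nid in nodes}
  -- (a missing "source"/"target" key is a KeyError, excluded by Pre_)
  (nodes.foldl (fun d p =>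
      d.insert p.1
        (edges_list.filterMap (fun e =>
          (e.lookup "target").bind (fun t =>
            (e.lookup "source").bind (fun s =>
              if t == p.1 then some s else none)))))
    PySem.Dict.empty).items

-- ===== PRECONDITION & SPEC =====
-- Pre_ excludes exactly the inputs where some edge dict lacks a "source" or "target" key,
-- on which the Python A raises KeyError.
def Pre_build_edges_dict_py (nodes : List (String × List String)) (edges_list : List (List (String × String))) : Prop :=
  ∀ e ∈ edges_list, (e.lookup "source").isSome = true ∧ (e.lookup "target").isSome = true
instance (nodes : List (String × List String)) (edges_list : List (List (String × String))) : Decidable (Pre_build_edges_dict_py nodes edges_list) := by unfold Pre_build_edges_dict_py; infer_instance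

def pvWitness_build_edges_dict_py : (List (String × List String)) × (List (List (String × String))) :=
  ([("a", []), ("b", [])], [[("source", "a"), ("target", "b")]])

def Spec_build_edges_dict_py (nodes : List (String × List String)) (edges_list : List (List (String × String))) (out : List (String × List String)) : Prop := out = build_edges_dict_py_alt nodes edges_list
instance (nodes : List (String × List String)) (edges_list : List (List (String × String))) (out : List (String × List String)) : Decidable (Spec_build_edges_dict_py nodes edges_list out) := by unfold Spec_build_edges_dict_py; infer_instance

-- ===== CLAIM (what is proved, stated in full; the proofs are below) =====
def Claim_equal_build_edges_dict_py : Prop := ∀ (nodes : List (String × List String)) (edges_list : List (List (String × String))), Dom_build_edges_dict_py nodes edges_list → Pre_build_edges_dict_py nodes edges_list → Spec_build_edges_dict_py nodes edges_list (build_edges_dict_py nodes edges_list)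

-- ===== LEMMAS AND PROOFS =====

-- the (target, source) pairs of the edges whose lookups succeed, in edge order
def pvPairs (edges_list : List (List (String × String))) : List (String × String) :=
  edges_list.filterMap (fun e =>
    match e.lookup "source", e.lookup "target" with
    | some s, some t => some (t, s)
    | _, _ => none)

def pvCollect (ps : List (String × String)) (k : String) : List String :=
  (ps.filter (fun p => p.1 == k)).map (·.2)

-- A's edge loop, restructured as a fold over pvPairs
theorem pv_fold_match_eq_pairs (F : PySem.Dict String (List String) → String → String → PySem.Dict String (List String)) :
    ∀ (edges : List (List (String × String))) (d : PySem.Dict String (List String)),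
      edges.foldl (fun d edge =>
        match edge.lookup "source", edge.lookup "target" with
        | some s, some t => F d t s
        | _, _ => d) d
      = (pvPairs edges).foldl (fun d p => F d p.1 p.2) d := by
  intro edges
  induction edges with
  | nil => intro d; rfl
  | cons e rest ih =>
      intro d
      simp only [List.foldl_cons, pvPairs, List.filterMap_cons]
      cases hs : e.lookup "source" <;> cases ht : e.lookup "target" <;>
        simp [ih, pvPairs]

theorem pv_collect_cons (t s : String) (ps : List (String × String)) (k : String) :
    pvCollect ((t, s) :: ps) k = (if t == k then [s] else []) ++ pvCollect ps k := by
  by_cases h : t = k <;> simp [pvCollect, h]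

-- B's inner comprehension computes pvCollect of the pairs
theorem pv_filterMap_eq_collect (k : String) :
    ∀ (edges : List (List (String × String))),
      edges.filterMap (fun e =>
        (e.lookup "target").bind (fun t =>
          (e.lookup "source").bind (fun s =>
            if t == k then some s else none)))
      = pvCollect (pvPairs edges) k := by
  intro edges
  induction edges with
  | nil => simp [pvPairs, pvCollect]
  | cons e rest ih =>
      rw [List.filterMap_cons]
      cases hs : e.lookup "source" with
      | none =>
          cases ht : e.lookup "target" with
          | none => simp only [hs, ht, pvPairs, List.filterMap_cons]; exact ih
          | some t => simp only [hs, ht, pvPairs, List.filterMap_cons]; exact ih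
      | some s =>
          cases ht : e.lookup "target" with
          | none => simp only [hs, ht, pvPairs, List.filterMap_cons]; exact ih
          | some t =>
              simp only [hs, ht, pvPairs, List.filterMap_cons]
              rw [show pvCollect ((t, s) :: List.filterMap
                    (fun e =>
                      match e.lookup "source", e.lookup "target" with
                      | some s, some t => some (t, s)
                      | _, _ => none) rest) k
                  = (if t == k then [s] else []) ++ pvCollect (List.filterMap
                    (fun e =>
                      match e.lookup "source", e.lookup "target" with
                      | some s, some t => some (t, s)
                      | _, _ => none) rest) k from pv_collect_cons t s _ k]
              have ih' := ih
              simp only [pvPairs, beq_iff_eq] at ih'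
              by_cases h : t = k <;> simp [h] <;> exact ih'

-- an insert-loop over the node keys onto a table dict: result is dedup'd keys mapped through f
theorem pv_foldl_insert_items (f : String → List String) :
    ∀ (nodes : List (String × List String)) (L : List String), L.Nodup →
      (nodes.foldl (fun d p => d.insert p.1 (f p.1))
        (PySem.Dict.mk (L.map (fun k => (k, f k))))).items
      = (PySem.Set.update L (nodes.map (·.1))).map (fun k => (k, f k)) := by
  intro nodes
  induction nodes with
  | nil => intro L h; simp [PySem.Set.update]
  | cons p rest ih =>
      intro L hnd
      have hkeys : (PySem.Dict.mk (L.map (fun k => (k, f k)))).keys = L := by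
        have h : ((fun x : String × List String => x.1) ∘ fun k => (k, f k)) = fun k => k := rfl
        simp [PySem.Dict.keys_mk, h]
      by_cases hm : p.1 ∈ L
      · have hc : (PySem.Dict.mk (L.map (fun k => (k, f k)))).contains p.1 = true := by
          rw [PySem.Dict.contains_iff_mem_keys, hkeys]; exact hm
        have hins : (PySem.Dict.mk (L.map (fun k => (k, f k)))).insert p.1 (f p.1)
            = PySem.Dict.mk (L.map (fun k => (k, f k))) := by
          apply PySem.Dict.ext
          rw [PySem.Dict.items_insert_of_contains _ _ hc]
          simp only [List.map_map]
          apply List.map_congr_left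
          intro k _
          by_cases hk : k = p.1 <;> simp [hk]
        have hadd : PySem.Set.add L p.1 = L := by
          simp [PySem.Set.add, PySem.Set.contains, hm]
        simp only [List.foldl_cons, hins, List.map_cons, PySem.Set.update_cons, hadd]
        exact ih L hnd
      · have hc : (PySem.Dict.mk (L.map (fun k => (k, f k)))).contains p.1 = false := by
          rw [← Bool.not_eq_true, PySem.Dict.contains_iff_mem_keys, hkeys]; exact hm
        have hins : (PySem.Dict.mk (L.map (fun k => (k, f k)))).insert p.1 (f p.1)
            = PySem.Dict.mk ((L ++ [p.1]).map (fun k => (k, f k))) := by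
          apply PySem.Dict.ext
          rw [PySem.Dict.items_insert_of_not_contains _ _ hc]
          simp
        have hadd : PySem.Set.add L p.1 = L ++ [p.1] := by
          simp [PySem.Set.add, PySem.Set.contains, hm]
        have hnd' : (L ++ [p.1]).Nodup := by
          refine List.Nodup.append hnd (List.nodup_singleton _) ?_
          intro a ha hb
          simp only [List.mem_singleton] at hb
          exact hm (hb ▸ ha)
        simp only [List.foldl_cons, hins, List.map_cons, PySem.Set.update_cons, hadd]
        exact ih (L ++ [p.1]) hnd'

-- A's guarded append loop over the pairs, on a table dict
theorem pv_foldA_items :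
    ∀ (ps : List (String × String)) (L : List String) (g : String → List String), L.Nodup →
      (ps.foldl (fun d p => if d.contains p.1 then d.modify p.1 [] (fun l => l ++ [p.2]) else d)
        (PySem.Dict.mk (L.map (fun k => (k, g k))))).items
      = L.map (fun k => (k, g k ++ pvCollect ps k)) := by
  intro ps
  induction ps with
  | nil => intro L g _; simp [pvCollect]
  | cons p rest ih =>
      intro L g hnd
      have hkeys : (PySem.Dict.mk (L.map (fun k => (k, g k)))).keys = L := by
        have h : ((fun x : String × List String => x.1) ∘ fun k => (k, g k)) = fun k => k := rfl
        simp [PySem.Dict.keys_mk, h]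
      by_cases hm : p.1 ∈ L
      · have hc : (PySem.Dict.mk (L.map (fun k => (k, g k)))).contains p.1 = true := by
          rw [PySem.Dict.contains_iff_mem_keys, hkeys]; exact hm
        have hgetD : (PySem.Dict.mk (L.map (fun k => (k, g k)))).getD p.1 [] = g p.1 := by
          apply PySem.Dict.getD_of_mem_items
          · exact List.mem_map_of_mem hm
          · rw [hkeys]; exact hnd
        have hmod : (PySem.Dict.mk (L.map (fun k => (k, g k)))).modify p.1 [] (fun l => l ++ [p.2])
            = PySem.Dict.mk (L.map (fun k => (k, (fun k => if k = p.1 then g k ++ [p.2] else g k) k))) := by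
          apply PySem.Dict.ext
          rw [PySem.Dict.modify, hgetD, PySem.Dict.items_insert_of_contains _ _ hc]
          simp only [List.map_map]
          apply List.map_congr_left
          intro k _
          by_cases hk : k = p.1 <;> simp [hk]
        simp only [List.foldl_cons, hc, if_true, hmod]
        rw [ih L _ hnd]
        apply List.map_congr_left
        intro k _
        rw [pv_collect_cons]
        by_cases hk : k = p.1 <;> simp [hk, beq_iff_eq]
        · intro h; exact absurd h.symm hk
      · have hc : (PySem.Dict.mk (L.map (fun k => (k, g k)))).contains p.1 = false := by
          rw [← Bool.not_eq_true, PySem.Dict.contains_iff_mem_keys, hkeys]; exact hm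
        simp only [List.foldl_cons, hc, Bool.false_eq_true, if_false]
        rw [ih L g hnd]
        apply List.map_congr_left
        intro k hk
        rw [pv_collect_cons]
        have : ¬ (p.1 == k) = true := by
          simp only [beq_iff_eq]; intro h; exact hm (h ▸ hk)
        simp [this]

theorem build_edges_dict_py_eq (nodes : List (String × List String)) (edges_list : List (List (String × String))) :
    build_edges_dict_py nodes edges_list
      = (PySem.Set.update [] (nodes.map (·.1))).map
          (fun k => (k, pvCollect (pvPairs edges_list) k)) := by
  show (edges_list.foldl (fun d edge =>
      match edge.lookup "source", edge.lookup "target" with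
      | some s, some t =>
          if d.contains t then d.modify t [] (fun l => l ++ [s]) else d
      | _, _ => d) (nodes.foldl (fun d p => d.insert p.1 []) PySem.Dict.empty)).items = _
  rw [pv_fold_match_eq_pairs (fun d t s => if d.contains t then d.modify t [] (fun l => l ++ [s]) else d)]
  have h0 : (nodes.foldl (fun d p => d.insert p.1 []) PySem.Dict.empty)
      = PySem.Dict.mk ((PySem.Set.update [] (nodes.map (·.1))).map
          (fun k => (k, (fun _ => ([] : List String)) k))) := by
    apply PySem.Dict.ext
    have := pv_foldl_insert_items (fun _ => ([] : List String)) nodes [] List.nodup_nil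
    simpa using this
  rw [PySem.Set.update_nil_left] at h0 ⊢
  rw [h0, pv_foldA_items (pvPairs edges_list) _ (fun _ => ([] : List String))
        (PySem.Set.nodup_ofList _)]
  simp

theorem build_edges_dict_py_alt_eq (nodes : List (String × List String)) (edges_list : List (List (String × String))) :
    build_edges_dict_py_alt nodes edges_list
      = (PySem.Set.update [] (nodes.map (·.1))).map
          (fun k => (k, pvCollect (pvPairs edges_list) k)) := by
  show (nodes.foldl (fun d p =>
      d.insert p.1
        (edges_list.filterMap (fun e =>
          (e.lookup "target").bind (fun t =>
            (e.lookup "source").bind (fun s =>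
              if t == p.1 then some s else none)))))
    PySem.Dict.empty).items = _
  have := pv_foldl_insert_items
      (fun k => pvCollect (pvPairs edges_list) k) nodes [] List.nodup_nil
  simp only [List.map_nil] at this
  calc _ = (nodes.foldl (fun d p => d.insert p.1 (pvCollect (pvPairs edges_list) p.1))
            (PySem.Dict.mk ([] : List (String × List String)))).items := by
            congr 1
            apply PySem.List.foldl_congr_mem
            intro d p _
            rw [pv_filterMap_eq_collect]
       _ = _ := this

-- ===== VERDICT (by name: the statement is the Claim_ definition above) =====
theorem build_edges_dict_py_spec : Claim_equal_build_edges_dict_py := by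
  intro nodes edges_list _ _
  unfold Spec_build_edges_dict_py
  rw [build_edges_dict_py_eq, build_edges_dict_py_alt_eq]
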